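-- pv_equiv track=rewrite | github.com/Abaabaxx/PaperSplit | converter.py | _count_brace_depth
-- ===== SOURCE A (Python) =====
-- def _count_brace_depth(text: str) -> int:
--     """计算文本中未闭合的 '{' 数量（忽略注释行和行内注释）。"""
--     depth = 0
--     for line in text.splitlines():
--         if line.lstrip().startswith("%"):
--             continue
--         pct = line.find("%")
--         code = line[:pct] if pct >= 0 else line
--         depth += code.count("{") - code.count("}")
--     return depth
-- ===== SOURCE B (Python) =====
-- # Single-pass character-level state machine: one scan over the text keeping an
-- # integer depth and an in-comment flag (reset at line boundaries), instead of
-- # splitting into lines and string-searching each line.  Exact on the task's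
-- # ASCII domain (printable + tab/newline/CR).
-- def _count_brace_depth(text: str) -> int:
--     depth = 0
--     in_comment = False
--     for ch in text:
--         if ch == '\n' or ch == '\r':
--             in_comment = False
--         elif in_comment:
--             pass
--         elif ch == '%':
--             in_comment = True
--         elif ch == '{':
--             depth += 1
--         elif ch == '}':
--             depth -= 1
--     return depth
-- ===== Notes on version B (the rewrite author's own statement) =====
-- stated objective: alternative
-- what changed: Replaced the line-splitting pass with per-line lstrip/startswith/find/count string searches by a single character-level scan maintaining a depth counter and an in-comment flag reset at line boundaries.
import Mathlib
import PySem

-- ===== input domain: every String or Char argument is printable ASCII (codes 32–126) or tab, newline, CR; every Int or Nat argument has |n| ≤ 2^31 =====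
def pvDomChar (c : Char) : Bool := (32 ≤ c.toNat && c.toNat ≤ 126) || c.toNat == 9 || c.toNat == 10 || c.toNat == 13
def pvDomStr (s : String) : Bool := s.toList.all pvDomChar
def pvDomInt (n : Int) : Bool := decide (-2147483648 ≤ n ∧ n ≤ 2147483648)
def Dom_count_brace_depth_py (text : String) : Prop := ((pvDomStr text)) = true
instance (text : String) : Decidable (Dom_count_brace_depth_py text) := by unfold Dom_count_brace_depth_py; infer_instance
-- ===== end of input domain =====

-- B replaces A's line-splitting + per-line string searches by a single character scan
-- with a depth counter and an in-comment flag (objective: alternative decomposition).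

-- ===== PORT A =====
def count_brace_depth_py (text : String) : Int :=
  (PySem.Str.splitlines text).foldl
    (fun depth line =>
      if PySem.Str.startswith (PySem.Str.lstrip line) "%" then depth
      else
        let pct : Int := PySem.Str.find line "%"
        let code : String := if 0 ≤ pct then PySem.Str.slice line none (some pct) else line
        depth + ((PySem.Str.count code "{" : Int) - (PySem.Str.count code "}" : Int)))
    0

-- ===== PORT B =====
def pvAltStep (st : Int × Bool) (c : Char) : Int × Bool :=
  if c = '\n' ∨ c = '\r' then (st.1, false)
  else if st.2 then st
  else if c = '%' then (st.1, true)
  else if c = '{' then (st.1 + 1, st.2)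
  else if c = '}' then (st.1 - 1, st.2)
  else st

def count_brace_depth_py_alt (text : String) : Int :=
  (text.toList.foldl pvAltStep (0, false)).1

-- ===== PRECONDITION & SPEC =====
def Spec_count_brace_depth_py (text : String) (out : Int) : Prop := out = count_brace_depth_py_alt text
instance (text : String) (out : Int) : Decidable (Spec_count_brace_depth_py text out) := by unfold Spec_count_brace_depth_py; infer_instance

-- ===== CLAIM (what is proved, stated in full; the proofs are below) =====
def Claim_equal_count_brace_depth_py : Prop := ∀ (text : String), Dom_count_brace_depth_py text → Spec_count_brace_depth_py text (count_brace_depth_py text)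

-- ===== LEMMAS AND PROOFS =====

-- the boundary predicate splitlines uses (identical to the literal in PySem.Chars.splitlines)
def pvIsB : Char → Bool := fun c =>
  have n := c.toNat
  decide (n = 10) || decide (n = 13) || decide (n = 11) || decide (n = 12) || decide (n = 28) ||
    decide (n = 29) || decide (n = 30) || decide (n = 133) || decide (n = 8232) || decide (n = 8233)

theorem pv_splitlines_eq (s : List Char) :
    PySem.Chars.splitlines s = PySem.Chars.splitlines.go pvIsB s [] [] := rfl

-- code part of a line: everything before the first '%'
def pvTW (p : List Char) : List Char := p.takeWhile (fun c => c != '%')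
-- per-line brace balance of the code part
def pvPB (p : List Char) : Int := ((pvTW p).count '{' : Int) - ((pvTW p).count '}' : Int)
-- A's per-line contribution, at the List Char level
def pvLineA (L : List Char) : Int :=
  if PySem.Chars.startswith (PySem.Chars.lstrip L) ['%'] then 0
  else if 0 ≤ PySem.Chars.find L ['%'] then
    ((PySem.Chars.count (PySem.Chars.slice L none (some (PySem.Chars.find L ['%']))) ['{'] : Int) -
      (PySem.Chars.count (PySem.Chars.slice L none (some (PySem.Chars.find L ['%']))) ['}'] : Int))
  else ((PySem.Chars.count L ['{'] : Int) - (PySem.Chars.count L ['}'] : Int))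
-- sum of per-line balances
def pvS (ls : List (List Char)) : Int := (ls.map pvPB).sum

theorem pv_count_go_singleton (c : Char) :
    ∀ (fuel : Nat) (s : List Char) (acc : Nat), s.length ≤ fuel →
      PySem.Chars.count.go [c] fuel s acc = acc + s.count c := by
  intro fuel
  induction fuel with
  | zero =>
    intro s acc h
    have : s = [] := List.eq_nil_of_length_eq_zero (Nat.le_zero.mp h)
    subst this; simp [PySem.Chars.count.go]
  | succ n ih =>
    intro s acc h
    cases s with
    | nil => simp [PySem.Chars.count.go]
    | cons x t =>
      have ht : t.length ≤ n := by simp at h; omega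
      by_cases hx : c = x
      · subst hx
        have hpr : [c].isPrefixOf (c :: t) = true := by simp [List.isPrefixOf]
        simp only [PySem.Chars.count.go, hpr, if_pos]
        rw [ih _ _ (by simpa using ht)]
        simp
        omega
      · have hpr : [c].isPrefixOf (x :: t) = false := by
          simp [List.isPrefixOf]; exact fun hh => (hx hh).elim
        simp only [PySem.Chars.count.go, hpr]
        rw [if_neg (by simp)]
        rw [ih t acc ht]
        have hxc : ¬ x = c := fun hh => hx hh.symm
        simp [hxc]

theorem pv_count_singleton (s : List Char) (c : Char) :
    PySem.Chars.count s [c] = s.count c := by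
  unfold PySem.Chars.count
  rw [if_neg (by simp)]
  simpa using pv_count_go_singleton c s.length s 0 le_rfl

theorem pv_tw_no_mem (L : List Char) (h : '%' ∉ L) : pvTW L = L := by
  unfold pvTW
  apply List.takeWhile_eq_self_iff.mpr
  intro x hx
  simp only [bne_iff_ne, ne_eq]
  exact fun he => h (he ▸ hx)

theorem pv_tw_take : ∀ (L : List Char) (j : Nat), ['%'] <+: L.drop j →
    (∀ i < j, ¬ ['%'] <+: L.drop i) → pvTW L = L.take j ∧ j ≤ L.length := by
  intro L
  induction L with
  | nil =>
    intro j hp _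
    simp at hp
  | cons x tl ih =>
    intro j hp hmin
    cases j with
    | zero =>
      simp only [List.drop_zero] at hp
      rcases hp with ⟨t, ht⟩
      simp at ht
      obtain ⟨hx, -⟩ := ht
      subst hx
      refine ⟨by unfold pvTW; simp, by simp⟩
    | succ j =>
      have hx : x ≠ '%' := by
        intro hx
        exact hmin 0 (Nat.succ_pos j) (by subst hx; exact ⟨tl, rfl⟩)
      have hdrop : ∀ i, (x :: tl).drop (i + 1) = tl.drop i := by intro i; simp
      have hp' : ['%'] <+: tl.drop j := by rw [← hdrop j]; exact hp
      have hmin' : ∀ i < j, ¬ ['%'] <+: tl.drop i := by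
        intro i hi
        rw [← hdrop i]
        exact hmin (i + 1) (by omega)
      obtain ⟨h1, h2⟩ := ih j hp' hmin'
      constructor
      · unfold pvTW at h1 ⊢
        simp [hx, h1]
      · simp; omega

theorem pv_lineA_eq_pb (L : List Char) : pvLineA L = pvPB L := by
  unfold pvLineA
  by_cases hs : PySem.Chars.startswith (PySem.Chars.lstrip L) ['%']
  · -- comment-only line: code before '%' is all whitespace, balance 0
    rw [if_pos hs]
    unfold PySem.Chars.startswith PySem.Chars.lstrip at hs
    have hpre : ['%'] <+: L.dropWhile PySem.Chars.isspace := by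
      exact List.isPrefixOf_iff_prefix.mp hs
    rcases hpre with ⟨r, hr⟩
    have hL : L.takeWhile PySem.Chars.isspace ++ ('%' :: r) = L := by
      rw [show ('%' :: r : List Char) = List.dropWhile PySem.Chars.isspace L from hr]
      exact List.takeWhile_append_dropWhile
    set w := L.takeWhile PySem.Chars.isspace with hw
    have hwsp : ∀ x ∈ w, PySem.Chars.isspace x = true := by
      intro x hx; exact List.mem_takeWhile_imp hx
    have hwne : ∀ x ∈ w, (x != '%') = true := by
      intro x hx
      simp only [bne_iff_ne, ne_eq]
      intro he
      have := hwsp x hx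
      rw [he] at this
      exact absurd this (by decide)
    have htw : pvTW L = w := by
      unfold pvTW
      rw [← hL, List.takeWhile_append]
      rw [List.takeWhile_eq_self_iff.mpr hwne]
      simp
    have hno : ∀ (b : Char), PySem.Chars.isspace b = false → w.count b = 0 := by
      intro b hb
      apply List.count_eq_zero.mpr
      intro hmem
      have := hwsp b hmem
      rw [this] at hb; exact absurd hb (by simp)
    unfold pvPB
    rw [htw, hno '{' (by decide), hno '}' (by decide)]
    simp
  · rw [if_neg hs]
    by_cases hm : '%' ∈ L
    · -- '%' present: find points at the first '%', code = take = takeWhile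
      have hinf : ['%'] <:+: L := (List.singleton_infix_iff '%' L).mpr hm
      have hnn : 0 ≤ PySem.Chars.find L ['%'] := (PySem.Chars.find_nonneg_iff L ['%']).mpr hinf
      obtain ⟨hp, hmin⟩ := PySem.Chars.find_spec hnn
      obtain ⟨htw, hle⟩ := pv_tw_take L (PySem.Chars.find L ['%']).toNat hp hmin
      have hslice : PySem.Chars.slice L none (some (PySem.Chars.find L ['%'])) =
          L.take (PySem.Chars.find L ['%']).toNat := by
        simp only [PySem.Chars.slice_eq_listSlice]
        exact PySem.List.slice_to L hnn
      rw [if_pos hnn, hslice, ← htw]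
      unfold pvPB
      rw [pv_count_singleton, pv_count_singleton]
    · -- no '%': code is the whole line
      have hne : PySem.Chars.find L ['%'] = -1 := by
        apply (PySem.Chars.find_eq_neg_one_iff L ['%']).mpr
        intro hinf
        exact hm ((List.singleton_infix_iff '%' L).mp hinf)
      rw [hne, if_neg (by norm_num)]
      unfold pvPB
      rw [pv_tw_no_mem L hm, pv_count_singleton, pv_count_singleton]

theorem pv_go_cons (c : Char) (rest cur : List Char) (acc : List (List Char))
    (h : ∀ r, c = '\r' → rest = '\n' :: r → False) :
    PySem.Chars.splitlines.go pvIsB (c :: rest) cur acc =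
      (if pvIsB c then PySem.Chars.splitlines.go pvIsB rest [] (cur.reverse :: acc)
       else PySem.Chars.splitlines.go pvIsB rest (c :: cur) acc) :=
  PySem.Chars.splitlines.go.eq_3 pvIsB cur acc c rest h

theorem pv_go_rn (rest cur : List Char) (acc : List (List Char)) :
    PySem.Chars.splitlines.go pvIsB ('\r' :: '\n' :: rest) cur acc =
      PySem.Chars.splitlines.go pvIsB rest [] (cur.reverse :: acc) :=
  PySem.Chars.splitlines.go.eq_2 pvIsB cur acc rest

theorem pv_go_nil (cur : List Char) (acc : List (List Char)) :
    PySem.Chars.splitlines.go pvIsB [] cur acc =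
      (if cur.isEmpty then acc.reverse else (cur.reverse :: acc).reverse) :=
  PySem.Chars.splitlines.go.eq_1 pvIsB cur acc

theorem pv_pb_nil : pvPB [] = 0 := by simp [pvPB, pvTW]

theorem pv_go_sum_acc :
    ∀ (n : Nat) (cs : List Char), cs.length ≤ n → ∀ (cur : List Char) (acc : List (List Char)),
      pvS (PySem.Chars.splitlines.go pvIsB cs cur acc) =
        (acc.map pvPB).sum + pvS (PySem.Chars.splitlines.go pvIsB cs cur []) := by
  intro n
  induction n with
  | zero =>
    intro cs hlen cur acc
    have : cs = [] := List.eq_nil_of_length_eq_zero (Nat.le_zero.mp hlen)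
    subst this
    rw [pv_go_nil, pv_go_nil]
    by_cases hcur : cur.isEmpty
    · rw [if_pos hcur, if_pos hcur]; simp [pvS]
    · rw [if_neg hcur, if_neg hcur]; simp [pvS]
  | succ n ih =>
    intro cs hlen cur acc
    rcases cs with - | ⟨c, rest⟩
    · rw [pv_go_nil, pv_go_nil]
      by_cases hcur : cur.isEmpty
      · rw [if_pos hcur, if_pos hcur]; simp [pvS]
      · rw [if_neg hcur, if_neg hcur]; simp [pvS]
    · by_cases hrn : c = '\r' ∧ rest.head? = some '\n'
      · obtain ⟨hc, hh⟩ := hrn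
        rcases rest with - | ⟨c2, rest2⟩
        · simp at hh
        · have hc2 : c2 = '\n' := by simpa using hh
          subst hc; subst hc2
          rw [pv_go_rn, pv_go_rn]
          have h2 : rest2.length ≤ n := by simp at hlen; omega
          rw [ih rest2 h2 [] (cur.reverse :: acc), ih rest2 h2 [] [cur.reverse]]
          simp [pvS]; ring
      · have hside : ∀ r, c = '\r' → rest = '\n' :: r → False := by
          intro r h1 h2; exact hrn ⟨h1, by rw [h2]; rfl⟩
        have h1 : rest.length ≤ n := by simp at hlen; omega
        rw [pv_go_cons c rest cur acc hside, pv_go_cons c rest cur [] hside]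
        by_cases hb : pvIsB c
        · rw [if_pos hb, if_pos hb]
          rw [ih rest h1 [] (cur.reverse :: acc), ih rest h1 [] [cur.reverse]]
          simp [pvS]; ring
        · rw [if_neg hb, if_neg hb]
          exact ih rest h1 (c :: cur) acc

theorem pv_dom_isB (c : Char) (hd : pvDomChar c = true) (hb : pvIsB c = true) :
    c = '\n' ∨ c = '\r' := by
  unfold pvDomChar at hd
  unfold pvIsB at hb
  simp only [Bool.or_eq_true, Bool.and_eq_true, decide_eq_true_eq, beq_iff_eq] at hd hb
  have h10 : ('\n' : Char).toNat = 10 := by decide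
  have h13 : ('\r' : Char).toNat = 13 := by decide
  have : c.toNat = 10 ∨ c.toNat = 13 := by omega
  rcases this with h | h
  · left; exact Char.ext (UInt32.toNat_inj.mp (by rw [← Char.toNat, ← Char.toNat, h, h10]))
  · right; exact Char.ext (UInt32.toNat_inj.mp (by rw [← Char.toNat, ← Char.toNat, h, h13]))

theorem pv_not_isB (c : Char) (hb : pvIsB c = false) : c ≠ '\n' ∧ c ≠ '\r' := by
  constructor
  · intro h; subst h; exact absurd hb (by decide)
  · intro h; subst h; exact absurd hb (by decide)

theorem pv_tw_append (p : List Char) (c : Char) :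
    pvTW (p ++ [c]) = if '%' ∈ p then pvTW p else p ++ pvTW [c] := by
  unfold pvTW
  rw [List.takeWhile_append]
  by_cases hm : '%' ∈ p
  · rw [if_pos hm, if_neg]
    intro hlen
    have hpre := List.takeWhile_prefix (l := p) (p := fun c => c != '%')
    have heq : p.takeWhile (fun c => c != '%') = p := hpre.eq_of_length hlen
    have := List.takeWhile_eq_self_iff.mp heq '%' hm
    simp at this
  · rw [if_neg hm, if_pos]
    have hself := pv_tw_no_mem p hm
    unfold pvTW at hself
    rw [hself]

-- the single-scan invariant: scanning the rest of the text from a state describing the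
-- current partial line equals the line-sum that splitlines.go will produce
-- the single-scan invariant: scanning the rest of the text from a state describing the
-- current partial line equals the line-sum that splitlines.go will produce
theorem pv_main :
    ∀ (n : Nat) (cs : List Char), cs.length ≤ n → ∀ (cur : List Char) (d : Int),
      (∀ c ∈ cs, pvDomChar c = true) →
      (cs.foldl pvAltStep (d + pvPB cur.reverse, decide ('%' ∈ cur.reverse))).1 =
        d + pvS (PySem.Chars.splitlines.go pvIsB cs cur []) := by
  have hnil : ∀ (cur : List Char) (d : Int),
      (([] : List Char).foldl pvAltStep (d + pvPB cur.reverse, decide ('%' ∈ cur.reverse))).1 =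
        d + pvS (PySem.Chars.splitlines.go pvIsB [] cur []) := by
    intro cur d
    rw [pv_go_nil]
    by_cases hcur : cur.isEmpty
    · have : cur = [] := by simpa [List.isEmpty_iff] using hcur
      subst this
      simp [pvS, pvPB, pvTW]
    · rw [if_neg hcur]
      simp [pvS]
  intro n
  induction n with
  | zero =>
    intro cs hlen cur d _
    have : cs = [] := List.eq_nil_of_length_eq_zero (Nat.le_zero.mp hlen)
    subst this
    exact hnil cur d
  | succ n ih =>
    intro cs hlen cur d hdom
    rcases cs with - | ⟨c, rest⟩
    · exact hnil cur d
    · by_cases hb : pvIsB c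
      · -- line boundary: the comment flag resets, a line closes
        have hc : c = '\n' ∨ c = '\r' := pv_dom_isB c (hdom c (by simp)) hb
        have hstep : pvAltStep (d + pvPB cur.reverse, decide ('%' ∈ cur.reverse)) c =
            (d + pvPB cur.reverse, false) := by
          unfold pvAltStep; rw [if_pos hc]
        by_cases hrn : c = '\r' ∧ rest.head? = some '\n'
        · obtain ⟨hcr, hh⟩ := hrn
          rcases rest with - | ⟨c2, rest2⟩
          · simp at hh
          · have hc2 : c2 = '\n' := by simpa using hh
            subst hcr; subst hc2
            rw [pv_go_rn]
            have hstep2 : pvAltStep (d + pvPB cur.reverse, false) '\n' =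
                (d + pvPB cur.reverse, false) := by unfold pvAltStep; simp
            rw [List.foldl_cons, hstep, List.foldl_cons, hstep2]
            have h2 : rest2.length ≤ n := by simp at hlen; omega
            have := ih rest2 h2 [] (d + pvPB cur.reverse)
              (fun x hx => hdom x (by simp [hx]))
            simp only [List.reverse_nil, pv_pb_nil, List.mem_nil_iff, decide_false, add_zero] at this
            rw [this, pv_go_sum_acc (rest2.length) rest2 le_rfl [] [cur.reverse]]
            simp [pvS]; ring
        · have hside : ∀ r, c = '\r' → rest = '\n' :: r → False := by
            intro r h1 h2; exact hrn ⟨h1, by rw [h2]; rfl⟩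
          rw [pv_go_cons c rest cur [] hside, if_pos hb]
          rw [List.foldl_cons, hstep]
          have h1 : rest.length ≤ n := by simp at hlen; omega
          have := ih rest h1 [] (d + pvPB cur.reverse)
            (fun x hx => hdom x (by simp [hx]))
          simp only [List.reverse_nil, pv_pb_nil, List.mem_nil_iff, decide_false, add_zero] at this
          rw [this, pv_go_sum_acc (rest.length) rest le_rfl [] [cur.reverse]]
          simp [pvS]; ring
      · -- ordinary character: it joins the current line
        have hside : ∀ r, c = '\r' → rest = '\n' :: r → False := by
          intro r h1 h2
          subst h1
          exact absurd hb (by decide)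
        rw [pv_go_cons c rest cur [] hside, if_neg (by simp [hb])]
        obtain ⟨hn1, hn2⟩ := pv_not_isB c (by simpa using hb)
        have hrev : (c :: cur).reverse = cur.reverse ++ [c] := by simp
        have hstep : pvAltStep (d + pvPB cur.reverse, decide ('%' ∈ cur.reverse)) c =
            (d + pvPB (cur.reverse ++ [c]), decide ('%' ∈ cur.reverse ++ [c])) := by
          unfold pvAltStep
          rw [if_neg (by tauto)]
          by_cases hm : '%' ∈ cur.reverse
          · rw [if_pos (by simp [hm])]
            have htw : pvTW (cur.reverse ++ [c]) = pvTW cur.reverse := by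
              rw [pv_tw_append]; exact if_pos hm
            simp [pvPB, htw, hm]
          · have htw : pvTW (cur.reverse ++ [c]) = cur.reverse ++ pvTW [c] := by
              rw [pv_tw_append]; exact if_neg hm
            have hpbp : pvPB cur.reverse =
                ((cur.reverse.count '{' : Int) - (cur.reverse.count '}' : Int)) := by
              simp [pvPB, pv_tw_no_mem _ hm]
            rw [if_neg (by simp [hm])]
            by_cases hpc : c = '%'
            · subst hpc
              rw [if_pos rfl]
              have htwp : pvTW ['%'] = [] := by decide
              simp [pvPB, htw, htwp, pv_tw_no_mem _ hm]
            · rw [if_neg hpc]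
              have htwc : pvTW [c] = [c] := by
                unfold pvTW; simp [hpc]
              have hmem : ¬ '%' ∈ cur.reverse ++ [c] := by
                simp [hm]
                exact fun h => hpc h.symm
              by_cases hob : c = '{'
              · subst hob
                rw [if_pos rfl]
                simp [pvPB, htw, htwc, List.count_append, hmem, hm, pv_tw_no_mem _ hm]
                ring
              · rw [if_neg hob]
                by_cases hcb : c = '}'
                · subst hcb
                  rw [if_pos rfl]
                  simp [pvPB, htw, htwc, List.count_append, hmem, hm, hob, pv_tw_no_mem _ hm]
                  ring
                · rw [if_neg hcb]
                  have hc1 : List.count '{' [c] = 0 := by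
                    rw [List.count_eq_zero]
                    intro h
                    exact hob (List.mem_singleton.mp h).symm
                  have hc2 : List.count '}' [c] = 0 := by
                    rw [List.count_eq_zero]
                    intro h
                    exact hcb (List.mem_singleton.mp h).symm
                  simp [pvPB, htw, htwc, List.count_append, hmem, hm, pv_tw_no_mem _ hm,
                    hc1, hc2]
        rw [List.foldl_cons, hstep, ← hrev]
        have h1 : rest.length ≤ n := by simp at hlen; omega
        exact ih rest h1 (c :: cur) d (fun x hx => hdom x (by simp [hx]))

-- ===== VERDICT (by name: the statement is the Claim_ definition above) =====
set_option maxHeartbeats 1000000 in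
theorem count_brace_depth_py_spec : Claim_equal_count_brace_depth_py := by
  unfold Claim_equal_count_brace_depth_py
  intro text hdom
  unfold Spec_count_brace_depth_py
  -- A's fold = sum of per-line values
  have hA : count_brace_depth_py text =
      ((PySem.Chars.splitlines text.toList).map pvPB).sum := by
    unfold count_brace_depth_py
    have hfun : (fun (depth : Int) (line : String) =>
        if PySem.Str.startswith (PySem.Str.lstrip line) "%" then depth
        else
          let pct : Int := PySem.Str.find line "%"
          let code : String := if 0 ≤ pct then PySem.Str.slice line none (some pct) else line
          depth + ((PySem.Str.count code "{" : Int) - (PySem.Str.count code "}" : Int))) =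
        (fun depth line => depth + pvLineA line.toList) := by
      funext depth line
      show (if PySem.Str.startswith (PySem.Str.lstrip line) "%" then depth
            else depth +
              ((PySem.Str.count (if 0 ≤ PySem.Str.find line "%" then
                  PySem.Str.slice line none (some (PySem.Str.find line "%")) else line) "{" : Int) -
               (PySem.Str.count (if 0 ≤ PySem.Str.find line "%" then
                  PySem.Str.slice line none (some (PySem.Str.find line "%")) else line) "}" : Int))) =
          depth + pvLineA line.toList
      unfold pvLineA
      have hsw : PySem.Str.startswith (PySem.Str.lstrip line) "%" =
          PySem.Chars.startswith (PySem.Chars.lstrip line.toList) ['%'] := by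
        simp [PySem.Str.startswith_eq, PySem.Str.toList_lstrip]
      have hfind : PySem.Str.find line "%" = PySem.Chars.find line.toList ['%'] := by
        simp [PySem.Str.find_eq]
      by_cases hs : PySem.Chars.startswith (PySem.Chars.lstrip line.toList) ['%']
      · rw [hsw, if_pos hs, if_pos hs]; ring
      · rw [hsw, if_neg hs, if_neg hs]
        simp only [hfind]
        by_cases hnn : 0 ≤ PySem.Chars.find line.toList ['%']
        · rw [if_pos hnn, if_pos hnn]
          congr 1
          have hcode : (PySem.Str.slice line none (some (PySem.Chars.find line.toList ['%']))).toList =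
              PySem.Chars.slice line.toList none (some (PySem.Chars.find line.toList ['%'])) := by
            simp [PySem.Str.toList_slice]
          rw [PySem.Str.count, PySem.Str.count, hcode,
            show ("{".toList : List Char) = ['{'] from rfl,
            show ("}".toList : List Char) = ['}'] from rfl]
        · rw [if_neg hnn, if_neg hnn]
          rw [PySem.Str.count, PySem.Str.count,
            show ("{".toList : List Char) = ['{'] from rfl,
            show ("}".toList : List Char) = ['}'] from rfl]
    rw [hfun, PySem.List.foldl_add]
    rw [show ((PySem.Str.splitlines text).map (fun line => pvLineA line.toList)) =
        ((PySem.Str.splitlines text).map String.toList).map pvLineA by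
      rw [List.map_map]; rfl]
    rw [PySem.Str.splitlines_map_toList]
    rw [List.map_congr_left (fun L _ => pv_lineA_eq_pb L)]
    ring
  -- B's scan = same sum
  have hB : count_brace_depth_py_alt text =
      ((PySem.Chars.splitlines text.toList).map pvPB).sum := by
    unfold count_brace_depth_py_alt
    have hdom' : ∀ c ∈ text.toList, pvDomChar c = true := by
      have := hdom
      unfold Dom_count_brace_depth_py pvDomStr at this
      exact fun c hc => List.all_eq_true.mp this c hc
    have := pv_main text.toList.length text.toList le_rfl [] 0 hdom'
    simp only [List.reverse_nil, pv_pb_nil, List.mem_nil_iff, decide_false, add_zero, zero_add] at this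
    rw [this, pv_splitlines_eq]
    rfl
  rw [hA, hB]
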